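-- pv_equiv track=rewrite | github.com/eolandro/IA2025 | añil/U3/come_solo/eat_alone.py | create_position_map
-- ===== SOURCE A (Python) =====
-- def create_position_map(size):
--     position_map = {}
--     counter = 1
--     for i in range(size):
--         for j in range(i + 1):
--             position_map[counter] = (i, j)
--             counter += 1
--     return position_map
-- ===== SOURCE B (Python) =====
-- def create_position_map(size):
--     n = size if size > 0 else 0
--     total = n * (n + 1) // 2
--     position_map = {}
--     i = 0
--     j = 0
--     for k in range(1, total + 1):
--         position_map[k] = (i, j)
--         if j == i:
--             i += 1
--             j = 0
--         else:
--             j += 1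
--     return position_map
-- ===== Notes on version B (the rewrite author's own statement) =====
-- stated objective: alternative
-- what changed: Replaces the nested row/column loops carrying a counter with a single flat loop over the whole triangular index range that maintains the (row, col) coordinates incrementally, rolling over to the next row when col reaches row.
import Mathlib
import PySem

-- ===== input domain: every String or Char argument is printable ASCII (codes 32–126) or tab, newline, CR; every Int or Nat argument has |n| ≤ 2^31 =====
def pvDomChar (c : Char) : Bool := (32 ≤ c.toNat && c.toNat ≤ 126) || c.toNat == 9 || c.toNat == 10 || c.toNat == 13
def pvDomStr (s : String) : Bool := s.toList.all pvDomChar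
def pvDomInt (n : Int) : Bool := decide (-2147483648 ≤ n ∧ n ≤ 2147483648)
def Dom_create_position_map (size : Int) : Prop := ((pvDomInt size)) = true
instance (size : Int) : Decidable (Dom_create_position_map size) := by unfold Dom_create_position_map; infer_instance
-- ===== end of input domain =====

-- B replaces A's nested row/column loops with one flat loop over the index range that
-- maintains the (row, col) pair incrementally (objective: alternative decomposition).

-- ===== PORT A =====
def create_position_map (size : Int) : List (Int × Int × Int) :=
  let st := (PySem.List.pyRange 0 size).foldl
    (fun (st : PySem.Dict Int (Int × Int) × Int) i =>
      (PySem.List.pyRange 0 (i + 1)).foldl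
        (fun st j => (st.1.insert st.2 (i, j), st.2 + 1)) st)
    (PySem.Dict.empty, 1)
  st.1.items

-- ===== PORT B =====
def create_position_map_alt (size : Int) : List (Int × Int × Int) :=
  let n : Int := if size > 0 then size else 0
  let total := PySem.Int.floordiv (n * (n + 1)) 2
  let st := (PySem.List.pyRange 1 (total + 1)).foldl
    (fun (st : List (Int × Int × Int) × Int × Int) k =>
      (st.1 ++ [(k, st.2.1, st.2.2)],
       if st.2.2 == st.2.1 then (st.2.1 + 1, 0) else (st.2.1, st.2.2 + 1)))
    ([], 0, 0)
  st.1

-- ===== PRECONDITION & SPEC =====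
def Spec_create_position_map (size : Int) (out : List (Int × Int × Int)) : Prop := out = create_position_map_alt size
instance (size : Int) (out : List (Int × Int × Int)) : Decidable (Spec_create_position_map size out) := by unfold Spec_create_position_map; infer_instance

-- ===== CLAIM (what is proved, stated in full; the proofs are below) =====
def Claim_equal_create_position_map : Prop := ∀ (size : Int), Dom_create_position_map size → Spec_create_position_map size (create_position_map size)

-- ===== LEMMAS AND PROOFS =====

-- triangular number
def pvT (n : Nat) : Nat := n * (n + 1) / 2

-- one row of the expected output, starting at key c
def pvRow (c i : Int) (m : Nat) : List (Int × Int × Int) :=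
  (List.range m).map (fun j : Nat => (c + (j : Int), i, (j : Int)))

-- the expected output for size n
def pvTri (n : Nat) : List (Int × Int × Int) :=
  (List.range n).flatMap (fun i => pvRow ((pvT i : Int) + 1) (i : Int) (i + 1))

lemma pvT_succ (n : Nat) : pvT (n + 1) = pvT n + (n + 1) := by
  unfold pvT
  have : (n + 1) * (n + 1 + 1) = n * (n + 1) + (n + 1) * 2 := by ring
  rw [this, Nat.add_mul_div_right _ _ (by norm_num : (0:Nat) < 2)]
lemma pvT_mono {i n : Nat} (h : i ≤ n) : pvT i ≤ pvT n := by
  induction n with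
  | zero => have hi : i = 0 := Nat.le_zero.mp h; simp [hi]
  | succ m ih =>
    rcases Nat.lt_or_ge i (m + 1) with h' | h'
    · have := ih (by omega)
      rw [pvT_succ]; omega
    · have hi : i = m + 1 := by omega
      simp [hi]
lemma pvTri_key_bound {p : Int × Int × Int} {n : Nat} (hp : p ∈ pvTri n) :
    1 ≤ p.1 ∧ p.1 ≤ (pvT n : Int) := by
  rw [pvTri] at hp
  obtain ⟨i, hi, hrow⟩ := List.mem_flatMap.mp hp
  rw [pvRow] at hrow
  obtain ⟨j, hjmem, hpe⟩ := List.mem_map.mp hrow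
  have hi' : i < n := List.mem_range.mp hi
  have hj : j < i + 1 := List.mem_range.mp hjmem
  have key : pvT i + j + 1 ≤ pvT n := by
    have h1 : pvT i + (i + 1) = pvT (i + 1) := (pvT_succ i).symm
    have h2 : pvT (i + 1) ≤ pvT n := pvT_mono (by omega)
    omega
  subst hpe
  have hc : ((pvT i + j + 1 : Nat) : Int) ≤ (pvT n : Int) := by exact_mod_cast key
  push_cast at hc
  constructor
  · show (1 : Int) ≤ (pvT i : Int) + 1 + j
    have : (0 : Int) ≤ (pvT i : Int) := by positivity
    have : (0 : Int) ≤ (j : Int) := by positivity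
    omega
  · show (pvT i : Int) + 1 + j ≤ (pvT n : Int)
    omega

lemma A_inner (iv : Int) (m : Nat) :
    ∀ (d : PySem.Dict Int (Int × Int)) (c : Int),
    (∀ k ∈ d.keys, k < c) →
    ((List.range m).map (fun j : Nat => (j : Int))).foldl
      (fun st j => (st.1.insert st.2 (iv, j), st.2 + 1)) (d, c)
      = (PySem.Dict.mk (d.items ++ pvRow c iv m), c + m) := by
  induction m with
  | zero =>
    intro d c hk
    simp only [List.range_zero, List.map_nil, List.foldl_nil, pvRow, List.append_nil,
      Nat.cast_zero, add_zero]
  | succ m ih =>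
    intro d c hk
    rw [List.range_succ, List.map_append, List.foldl_append, ih d c hk]
    have hnc : (PySem.Dict.mk (d.items ++ pvRow c iv m)).contains (c + (m : Int)) = false := by
      rw [PySem.Dict.contains_eq_decide_mem_keys]
      simp only [PySem.Dict.keys, List.map_append, List.mem_append, decide_eq_false_iff_not]
      rintro (hmem | hmem)
      · have := hk _ (by simpa [PySem.Dict.keys] using hmem)
        have hm0 : (0 : Int) ≤ (m : Int) := by positivity
        omega
      · rw [pvRow] at hmem
        simp only [List.map_map, List.mem_map, Function.comp] at hmem
        obtain ⟨j, hjmem, hje⟩ := hmem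
        have hj : j < m := List.mem_range.mp hjmem
        have : ((j : Int)) < (m : Int) := by exact_mod_cast hj
        omega
    simp only [List.map_cons, List.map_nil, List.foldl_cons, List.foldl_nil]
    refine Prod.ext ?_ ?_
    · apply PySem.Dict.ext
      rw [PySem.Dict.items_insert_of_not_contains _ _ hnc]
      show (d.items ++ pvRow c iv m) ++ [(c + (m : Int), iv, (m : Int))]
        = d.items ++ pvRow c iv (m + 1)
      rw [pvRow, pvRow, List.range_succ, List.map_append, List.append_assoc]
      simp
    · show c + (m : Int) + 1 = c + ((m : Nat) + 1 : Nat)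
      push_cast
      ring

lemma A_outer (n : Nat) :
    ((List.range n).map (fun i : Nat => (i : Int))).foldl
      (fun (st : PySem.Dict Int (Int × Int) × Int) i =>
        (PySem.List.pyRange 0 (i + 1)).foldl
          (fun st j => (st.1.insert st.2 (i, j), st.2 + 1)) st)
      (PySem.Dict.empty, 1)
      = (PySem.Dict.mk (pvTri n), (pvT n : Int) + 1) := by
  induction n with
  | zero => rfl
  | succ n ih =>
    rw [List.range_succ, List.map_append, List.foldl_append, ih]
    simp only [List.map_cons, List.map_nil, List.foldl_cons, List.foldl_nil]
    have hcast : ((n : Int) + 1) = ((n + 1 : Nat) : Int) := by push_cast; ring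
    rw [hcast, PySem.List.pyRange_zero_natCast]
    have hkeys : ∀ k ∈ (PySem.Dict.mk (pvTri n)).keys, k < (pvT n : Int) + 1 := by
      intro k hkmem
      simp only [PySem.Dict.keys, List.mem_map] at hkmem
      obtain ⟨p, hp, hpk⟩ := hkmem
      have := (pvTri_key_bound hp).2
      omega
    rw [A_inner (n : Int) (n + 1) (PySem.Dict.mk (pvTri n)) ((pvT n : Int) + 1) hkeys]
    refine Prod.ext ?_ ?_
    · apply PySem.Dict.ext
      show (pvTri n ++ pvRow ((pvT n : Int) + 1) (n : Int) (n + 1)) = pvTri (n + 1)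
      rw [pvTri, pvTri, List.range_succ, List.flatMap_append]
      simp
    · show (pvT n : Int) + 1 + ((n + 1 : Nat) : Int) = ((pvT (n + 1) : Nat) : Int) + 1
      rw [pvT_succ]
      push_cast
      ring

def pvStepB (st : List (Int × Int × Int) × Int × Int) (k : Int) :
    List (Int × Int × Int) × Int × Int :=
  (st.1 ++ [(k, st.2.1, st.2.2)],
   if st.2.2 == st.2.1 then (st.2.1 + 1, 0) else (st.2.1, st.2.2 + 1))

lemma pvShift (c jv iv : Int) (t : Nat) :
    (List.range (t + 1)).map (fun u : Nat => (c + (u : Int), iv, jv + (u : Int)))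
      = (c, iv, jv) :: (List.range t).map
          (fun u : Nat => (c + 1 + (u : Int), iv, jv + 1 + (u : Int))) := by
  rw [List.range_succ_eq_map, List.map_cons, List.map_map]
  congr 1
  · exact Prod.ext (by push_cast; ring) (Prod.ext rfl (by push_cast; ring))
  · apply List.map_congr_left
    intro u _
    show (c + ((u + 1 : Nat) : Int), iv, jv + ((u + 1 : Nat) : Int))
      = (c + 1 + (u : Int), iv, jv + 1 + (u : Int))
    exact Prod.ext (by push_cast; ring) (Prod.ext rfl (by push_cast; ring))

lemma B_row (iv : Int) (t : Nat) :
    ∀ (c jv : Int) (acc : List (Int × Int × Int)),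
    jv + (t : Int) = iv →
    (PySem.List.pyRange c (c + ((t : Int) + 1))).foldl pvStepB (acc, iv, jv)
      = (acc ++ (List.range (t + 1)).map (fun u : Nat => (c + (u : Int), iv, jv + (u : Int))),
         iv + 1, 0) := by
  induction t with
  | zero =>
    intro c jv acc h
    have hji : jv = iv := by push_cast at h; omega
    rw [PySem.List.pyRange_one_cons (by omega : c < c + ((0 : Nat) + 1 : Int))]
    rw [PySem.List.pyRange_one_eq_nil (by omega : c + (((0 : Nat) : Int) + 1) ≤ c + 1)]
    simp [pvStepB, hji]
  | succ t ih =>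
    intro c jv acc h
    have hji : jv ≠ iv := by push_cast at h ⊢; omega
    rw [PySem.List.pyRange_one_cons (by push_cast; omega : c < c + (((t + 1 : Nat) : Int) + 1))]
    simp only [List.foldl_cons]
    have hstep : pvStepB (acc, iv, jv) c = (acc ++ [(c, iv, jv)], iv, jv + 1) := by
      simp [pvStepB, hji]
    rw [hstep]
    have hrange : PySem.List.pyRange (c + 1) (c + (((t + 1 : Nat) : Int) + 1))
        = PySem.List.pyRange (c + 1) ((c + 1) + (((t : Nat) : Int) + 1)) := by
      congr 1
      push_cast
      ring
    rw [hrange, ih (c + 1) (jv + 1) (acc ++ [(c, iv, jv)]) (by push_cast at h ⊢; omega)]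
    refine Prod.ext ?_ rfl
    show (acc ++ [(c, iv, jv)]) ++ (List.range (t + 1)).map
        (fun u : Nat => (c + 1 + (u : Int), iv, jv + 1 + (u : Int)))
      = acc ++ (List.range (t + 1 + 1)).map (fun u : Nat => (c + (u : Int), iv, jv + (u : Int)))
    rw [pvShift c jv iv (t + 1), List.append_assoc, List.singleton_append]

lemma B_outer (n : Nat) :
    (PySem.List.pyRange 1 ((pvT n : Int) + 1)).foldl pvStepB ([], 0, 0)
      = (pvTri n, (n : Int), 0) := by
  induction n with
  | zero => rfl
  | succ n ih =>
    have hT0 : (0 : Int) ≤ (pvT n : Int) := Int.natCast_nonneg _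
    have hn0 : (0 : Int) ≤ ((n : Nat) : Int) := Int.natCast_nonneg _
    have hsplit : PySem.List.pyRange 1 ((pvT (n + 1) : Int) + 1)
        = PySem.List.pyRange 1 ((pvT n : Int) + 1)
          ++ PySem.List.pyRange ((pvT n : Int) + 1) (((pvT n : Int) + 1) + (((n : Nat) : Int) + 1)) := by
      rw [← PySem.List.pyRange_one_append 1 ((pvT n : Int) + 1) _ (by omega) (by omega)]
      congr 1
      rw [pvT_succ]
      push_cast
      ring
    rw [hsplit, List.foldl_append, ih,
      B_row (n : Int) n ((pvT n : Int) + 1) 0 (pvTri n) (by ring)]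
    refine Prod.ext ?_ (Prod.ext (by push_cast; ring) rfl)
    have hmap : (List.range (n + 1)).map
        (fun u : Nat => ((pvT n : Int) + 1 + (u : Int), (n : Int), (0 : Int) + (u : Int)))
        = pvRow ((pvT n : Int) + 1) (n : Int) (n + 1) := by
      rw [pvRow]
      apply List.map_congr_left
      intro u _
      exact Prod.ext rfl (Prod.ext rfl (by ring))
    show pvTri n ++ _ = pvTri (n + 1)
    rw [hmap, pvTri, pvTri, List.range_succ, List.flatMap_append]
    simp

-- ===== VERDICT (by name: the statement is the Claim_ definition above) =====
theorem create_position_map_spec : Claim_equal_create_position_map := by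
  intro size _
  unfold Spec_create_position_map create_position_map create_position_map_alt
  by_cases hpos : size > 0
  · have hm : size = ((size.toNat : Nat) : Int) := (Int.toNat_of_nonneg (by omega)).symm
    simp only [if_pos hpos]
    rw [hm, PySem.List.pyRange_zero_natCast, A_outer size.toNat]
    have htot : PySem.Int.floordiv ((size.toNat : Int) * ((size.toNat : Int) + 1)) 2
        = ((pvT size.toNat : Nat) : Int) := by
      have hc : ((size.toNat : Int)) * ((size.toNat : Int) + 1)
          = ((size.toNat * (size.toNat + 1) : Nat) : Int) := by push_cast; ring
      rw [hc]
      exact_mod_cast PySem.Int.floordiv_natCast (size.toNat * (size.toNat + 1)) 2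
    rw [htot,
      show (fun (st : List (Int × Int × Int) × Int × Int) (k : Int) =>
          (st.1 ++ [(k, st.2.1, st.2.2)],
           if st.2.2 == st.2.1 then (st.2.1 + 1, 0) else (st.2.1, st.2.2 + 1))) = pvStepB from rfl,
      B_outer size.toNat]
  · have hA : PySem.List.pyRange 0 size = [] :=
      PySem.List.pyRange_one_eq_nil (by omega)
    simp only [if_neg hpos, hA, List.foldl_nil]
    have hB : PySem.List.pyRange 1 (PySem.Int.floordiv ((0 : Int) * ((0 : Int) + 1)) 2 + 1) = [] := by
      apply PySem.List.pyRange_one_eq_nil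
      norm_num [PySem.Int.floordiv]
    rw [hB, List.foldl_nil]
    rfl
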